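-- pv_equiv track=rewrite | github.com/recepaksakal/image-encryption | app.py | re_fractal
-- ===== SOURCE A (Python) =====
-- def re_fractal(h, w, b, m):
--     blist = []
--     for i in range(0,len(m),b):
--         blist.append((m[i], m[i+1], m[i+2]))
--     eia = []
--     for i in range(0, len(blist), w):
--         eia.append(blist[i:i+w])
--     return eia
-- ===== SOURCE B (Python) =====
-- def re_fractal(h, w, b, m):
--     # Build the rows directly: outer loop walks row starts (stride b*w over m),
--     # inner loop collects that row's pixel triples; no intermediate flat list.
--     eia = []
--     if b > 0 and w > 0:
--         row_step = b * w
--         for start in range(0, len(m), row_step):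
--             row = []
--             for i in range(start, min(start + row_step, len(m)), b):
--                 row.append((m[i], m[i+1], m[i+2]))
--             eia.append(row)
--     return eia
-- ===== Notes on version B (the rewrite author's own statement) =====
-- stated objective: alternative
-- what changed: A builds the whole flat list of pixel triples and then chunks it with slices in a second pass; B builds each row directly in one fused nested pass over row starts (stride b*w), with no intermediate flat list and no slicing.
import Mathlib
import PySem

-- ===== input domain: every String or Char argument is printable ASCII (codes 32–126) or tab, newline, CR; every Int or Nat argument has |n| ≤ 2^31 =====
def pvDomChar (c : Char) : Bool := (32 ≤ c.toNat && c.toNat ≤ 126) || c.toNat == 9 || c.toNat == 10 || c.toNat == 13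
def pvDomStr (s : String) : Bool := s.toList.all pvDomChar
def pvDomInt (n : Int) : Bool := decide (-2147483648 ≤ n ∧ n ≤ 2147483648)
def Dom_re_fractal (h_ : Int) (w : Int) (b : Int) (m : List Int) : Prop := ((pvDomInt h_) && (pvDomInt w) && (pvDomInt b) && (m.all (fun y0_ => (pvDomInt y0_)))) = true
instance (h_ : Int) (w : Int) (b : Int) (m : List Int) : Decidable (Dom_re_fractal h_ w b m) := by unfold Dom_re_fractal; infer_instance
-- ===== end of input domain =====

-- B replaces A's two passes (build the flat triple list, then chunk it) by one fused nested
-- pass that builds each row directly from m; same return value on Pre_, alternative structure.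

-- ===== PORT A =====
def re_fractal (h_ : Int) (w : Int) (b : Int) (m : List Int) : List (List (Int × Int × Int)) :=
  let blist := (PySem.List.pyRange 0 (PySem.List.len m) b).foldl
    (fun blist i => blist ++
      [(PySem.List.pyGetD m i 0, PySem.List.pyGetD m (i+1) 0, PySem.List.pyGetD m (i+2) 0)]) []
  let eia := (PySem.List.pyRange 0 (PySem.List.len blist) w).foldl
    (fun eia i => eia ++ [PySem.List.slice blist (some i) (some (i + w))]) []
  eia

-- ===== PORT B =====
def re_fractal_alt (h_ : Int) (w : Int) (b : Int) (m : List Int) : List (List (Int × Int × Int)) :=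
  if 0 < b ∧ 0 < w then
    let rowStep := b * w
    (PySem.List.pyRange 0 (PySem.List.len m) rowStep).foldl
      (fun eia start =>
        eia ++ [(PySem.List.pyRange start (min (start + rowStep) (PySem.List.len m)) b).foldl
          (fun row i => row ++
            [(PySem.List.pyGetD m i 0, PySem.List.pyGetD m (i+1) 0, PySem.List.pyGetD m (i+2) 0)]) []]) []
  else []

-- ===== PRECONDITION & SPEC =====
-- Pre_ excludes exactly the inputs where Python A raises: b = 0 or w = 0 (zero range step,
-- ValueError) and, for positive b, a visited index whose triple runs past the end (IndexError).
def Pre_re_fractal (h_ : Int) (w : Int) (b : Int) (m : List Int) : Prop :=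
  b ≠ 0 ∧ w ≠ 0 ∧
    (0 < b → ∀ i ∈ PySem.List.pyRange 0 (PySem.List.len m) b, i + 2 < PySem.List.len m)
instance (h_ : Int) (w : Int) (b : Int) (m : List Int) : Decidable (Pre_re_fractal h_ w b m) := by
  unfold Pre_re_fractal; infer_instance
def pvWitness_re_fractal : Int × Int × Int × List Int := (0, 2, 3, [1, 2, 3, 4, 5, 6])

def Spec_re_fractal (h_ : Int) (w : Int) (b : Int) (m : List Int) (out : List (List (Int × Int × Int))) : Prop := out = re_fractal_alt h_ w b m
instance (h_ : Int) (w : Int) (b : Int) (m : List Int) (out : List (List (Int × Int × Int))) : Decidable (Spec_re_fractal h_ w b m out) := by unfold Spec_re_fractal; infer_instance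

-- ===== CLAIM (what is proved, stated in full; the proofs are below) =====
def Claim_equal_re_fractal : Prop := ∀ (h_ : Int) (w : Int) (b : Int) (m : List Int), Dom_re_fractal h_ w b m → Pre_re_fractal h_ w b m → Spec_re_fractal h_ w b m (re_fractal h_ w b m)
-- ===== LEMMAS AND PROOFS =====

-- k is below a python-range count (positive step) iff the k-th visited value is below the stop
lemma lt_cnt_iff (a stop step : Int) (hs : 0 < step) (k : ℕ) :
    (k < if a < stop then ((stop - a + step - 1) / step).toNat else 0) ↔ a + step * k < stop := by
  split_ifs with h
  · rw [Int.lt_toNat, Int.lt_iff_add_one_le, Int.le_ediv_iff_mul_le hs]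
    constructor <;> intro hx <;> nlinarith
  · constructor
    · intro hk; exact absurd hk (Nat.not_lt_zero k)
    · intro hlt; exfalso; have : (0:ℤ) ≤ step * k := by positivity
      rw [not_lt] at h; linarith

lemma nat_eq_of_lt_iff {X Y : ℕ} (h : ∀ k, k < X ↔ k < Y) : X = Y := by
  rcases lt_trichotomy X Y with hlt | he | hgt
  · exact absurd ((h X).mpr hlt) (lt_irrefl X)
  · exact he
  · exact absurd ((h Y).mp hgt) (lt_irrefl Y)


-- an empty python range: negative step with start ≤ stop
lemma pyRange_step_neg_nil (a stop step : Int) (hs : step < 0) (h : a ≤ stop) :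
    PySem.List.pyRange a stop step = [] := by
  simp [PySem.List.pyRange, show step ≠ 0 by omega, show ¬ 0 < step by omega,
    show ¬ stop < a by omega]

lemma pyRange_self (a step : Int) : PySem.List.pyRange a a step = [] := by
  simp [PySem.List.pyRange]

-- the two programs agree in the main case 0 < b, 0 < w
lemma rows_eq (h_ w b : Int) (m : List Int) (hb : 0 < b) (hw : 0 < w) :
    re_fractal h_ w b m = re_fractal_alt h_ w b m := by
  unfold re_fractal re_fractal_alt
  rw [if_pos ⟨hb, hw⟩]
  have hbw : 0 < b * w := mul_pos hb hw
  have eb := fun a stop => PySem.List.pyRange_of_pos a stop hb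
  have ew := fun a stop => PySem.List.pyRange_of_pos a stop hw
  have ebw := fun a stop => PySem.List.pyRange_of_pos a stop hbw
  simp only [PySem.List.foldl_append_singleton_eq_map, List.nil_append, PySem.List.len_eq,
    eb, ew, ebw, List.length_map, List.length_range, List.map_map]
  set n : ℤ := (m.length : ℤ) with hn
  set Lb : ℕ := if 0 < n then ((n - 0 + b - 1) / b).toNat else 0 with hLbdef
  have hwt : ((w.toNat : ℤ)) = w := Int.toNat_of_nonneg hw.le
  have hLb : ∀ k : ℕ, (k < Lb) ↔ 0 + b * (k:ℤ) < n := fun k => lt_cnt_iff 0 n b hb k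
  have hLbZ : ∀ j : ℤ, 0 ≤ j → (j < (Lb:ℤ) ↔ b * j < n) := by
    intro j hj
    have h1 := hLb j.toNat
    have h2 : ((j.toNat : ℤ)) = j := Int.toNat_of_nonneg hj
    rw [h2] at h1
    constructor
    · intro hlt; have hx : j.toNat < Lb := by omega
      have := h1.mp hx; linarith
    · intro hlt; have := h1.mpr (by linarith); omega
  have hXY : (if 0 < (Lb:ℤ) then (((Lb:ℤ) - 0 + w - 1) / w).toNat else 0)
      = (if 0 < n then ((n - 0 + b * w - 1) / (b * w)).toNat else 0) := by
    apply nat_eq_of_lt_iff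
    intro k
    rw [lt_cnt_iff 0 (Lb:ℤ) w hw k, lt_cnt_iff 0 n (b*w) hbw k,
        hLbZ (0 + w * k) (by positivity)]
    constructor <;> intro h' <;> nlinarith
  rw [hXY]
  apply List.map_congr_left
  intro r _
  simp only [Function.comp_apply]
  have e1 : (0:ℤ) + w * (r:ℤ) = ((w.toNat * r : ℕ) : ℤ) := by rw [Nat.cast_mul, hwt]; ring
  have e2 : (0:ℤ) + w * (r:ℤ) + w = ((w.toNat * r : ℕ) : ℤ) + ((w.toNat : ℕ) : ℤ) := by
    rw [Nat.cast_mul, hwt]; ring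
  rw [e1]
  rw [show ((w.toNat * r : ℕ) : ℤ) + w = ((w.toNat * r : ℕ) : ℤ) + ((w.toNat : ℕ) : ℤ) by rw [hwt]]
  rw [PySem.List.slice_natCast_add]
  apply List.ext_getElem
  · simp only [List.length_take, List.length_drop, List.length_map, List.length_range]
    apply nat_eq_of_lt_iff
    intro j
    rw [lt_cnt_iff (0 + b*w*(r:ℤ)) (min (0 + b*w*(r:ℤ) + b*w) n) b hb j, lt_min_iff, lt_min_iff]
    constructor
    · rintro ⟨hj1, hj2'⟩
      have hj2 : w.toNat * r + j < Lb := by omega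
      have h3 := (hLb (w.toNat * r + j)).mp hj2
      push_cast [hwt] at h3
      have hjw : (j:ℤ) < w := by rw [← hwt]; exact_mod_cast hj1
      constructor <;> nlinarith
    · rintro ⟨hj1, hj2⟩
      have hjw : (j:ℤ) < w := by nlinarith
      have hj1' : j < w.toNat := by rw [← hwt] at hjw; exact_mod_cast hjw
      have hlt : w.toNat * r + j < Lb := (hLb _).mpr (by push_cast [hwt]; nlinarith)
      exact ⟨hj1', by omega⟩
  · intro i h1 h2
    simp only [List.getElem_take, List.getElem_drop, List.getElem_map, List.getElem_range,
      Function.comp_apply]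
    have harg : (0:ℤ) + b * ((w.toNat * r + i : ℕ):ℤ) = 0 + b*w*(r:ℤ) + b*(i:ℤ) := by
      push_cast [hwt]; ring
    rw [harg]


theorem re_fractal_spec : Claim_equal_re_fractal := by
  intro h_ w b m _ hpre
  obtain ⟨hb0, hw0, -⟩ := hpre
  unfold Spec_re_fractal
  by_cases hb : 0 < b
  · by_cases hw : 0 < w
    · exact rows_eq h_ w b m hb hw
    · unfold re_fractal re_fractal_alt
      rw [if_neg (fun hc => hw hc.2)]
      have hwneg : w < 0 := by omega
      have hnil : ∀ L : ℕ, PySem.List.pyRange 0 (L:ℤ) w = [] := fun L =>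
        pyRange_step_neg_nil _ _ _ hwneg (by positivity)
      simp only [PySem.List.len_eq, hnil, List.foldl_nil]
  · unfold re_fractal re_fractal_alt
    rw [if_neg (fun hc => hb hc.1)]
    have hbneg : b < 0 := by omega
    have hbnil : PySem.List.pyRange 0 ((m.length : ℕ):ℤ) b = [] :=
      pyRange_step_neg_nil _ _ _ hbneg (by positivity)
    simp only [PySem.List.len_eq, hbnil, List.foldl_nil, List.length_nil, Nat.cast_zero,
      pyRange_self]
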